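-- pv_equiv track=rewrite | github.com/pypi-data/pypi-mirror-403 | packages/pytrivialsql/pytrivialsql-0.1.20.tar.gz/pytrivialsql-0.1.20/src/pytrivialsql/sql.py | _in_clause_for_seq
-- ===== SOURCE A (Python) =====
-- def _in_clause_for_seq(col, seq, placeholder):
--     vals = list(seq)
--     non_null = [v for v in vals if v is not None]
--     has_null = any(v is None for v in vals)
--
--     if not non_null and has_null:
--         return f"{col} IS NULL", ()
--
--     if not non_null:
--         # Empty list, no NULLs: match nothing
--         return "1=0", ()
--
--     placeholders = ", ".join([placeholder] * len(non_null))
--     base = f"{col} IN ({placeholders})"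
--     if has_null:
--         return f"({base} OR {col} IS NULL)", tuple(non_null)
--     return base, tuple(non_null)
-- ===== SOURCE B (Python) =====
-- def _in_clause_for_seq(col, seq, placeholder):
--     vals = list(seq)
--     if None in vals:
--         # Reduce to the NULL-free case, then wrap in an OR with the IS NULL test.
--         clause, params = _in_clause_for_seq(col, [v for v in vals if v is not None], placeholder)
--         if params:
--             return f"({clause} OR {col} IS NULL)", params
--         return f"{col} IS NULL", ()
--     if not vals:
--         return "1=0", ()
--     placeholders = (len(vals) * (placeholder + ", "))[:-2]
--     return f"{col} IN ({placeholders})", tuple(vals)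
-- ===== Notes on version B (the rewrite author's own statement) =====
-- stated objective: alternative
-- what changed: B is a case-reduction recursion: when NULLs are present it strips them and recursively solves the NULL-free subproblem, then wraps that answer in an OR with the IS NULL test; the base case handles only NULL-free lists and builds placeholders by string repetition plus a slice instead of a join, so no has_null flag or clause list is ever maintained.
import Mathlib
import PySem

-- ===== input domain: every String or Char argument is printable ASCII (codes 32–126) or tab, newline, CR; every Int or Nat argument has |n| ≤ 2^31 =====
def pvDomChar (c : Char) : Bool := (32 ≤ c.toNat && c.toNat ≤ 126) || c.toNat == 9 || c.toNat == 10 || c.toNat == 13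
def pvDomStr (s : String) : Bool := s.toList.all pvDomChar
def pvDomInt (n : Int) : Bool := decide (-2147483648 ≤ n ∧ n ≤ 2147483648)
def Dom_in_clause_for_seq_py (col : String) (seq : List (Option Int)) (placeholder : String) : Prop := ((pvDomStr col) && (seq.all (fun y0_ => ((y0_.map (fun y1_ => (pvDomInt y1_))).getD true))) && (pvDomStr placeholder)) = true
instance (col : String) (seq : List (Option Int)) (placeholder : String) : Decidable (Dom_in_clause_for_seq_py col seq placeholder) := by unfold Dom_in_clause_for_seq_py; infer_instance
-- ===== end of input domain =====

-- B replaces A's partition-then-four-way-branch with a case-reduction recursion (strip NULLs,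
-- solve the NULL-free subproblem, wrap its answer in an OR with IS NULL) and builds the
-- placeholder list by string repetition + slice instead of a join (objective: alternative; same cost).

-- ===== PORT A =====
def in_clause_for_seq_py (col : String) (seq : List (Option Int)) (placeholder : String) : String × List Int :=
  let vals := seq
  let nonNull := vals.filterMap id
  let hasNull := vals.any Option.isNone
  if nonNull = [] ∧ hasNull then (col ++ " IS NULL", [])
  else if nonNull = [] then ("1=0", [])
  else
    let placeholders := PySem.Str.join ", " (List.replicate nonNull.length placeholder)
    let base := col ++ " IN (" ++ placeholders ++ ")"
    if hasNull then ("(" ++ base ++ " OR " ++ col ++ " IS NULL)", nonNull)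
    else (base, nonNull)

-- ===== PORT B =====
-- literal port of Source B's recursion; the recursive call is on the NULL-free filtered list
def in_clause_for_seq_py_alt (col : String) (seq : List (Option Int)) (placeholder : String) : String × List Int :=
  if h : none ∈ seq then
    let r := in_clause_for_seq_py_alt col (seq.filter (fun v => v.isSome)) placeholder
    if r.2 ≠ [] then ("(" ++ r.1 ++ " OR " ++ col ++ " IS NULL)", r.2)
    else (col ++ " IS NULL", [])
  else if seq = [] then ("1=0", [])
  else
    -- (len(vals) * (placeholder + ", "))[:-2], on code points
    let placeholders := String.ofList (PySem.List.slice
      (PySem.List.pyRepeat (placeholder.toList ++ [',', ' ']) seq.length) none (some (-2)))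
    (col ++ " IN (" ++ placeholders ++ ")", seq.filterMap id)
termination_by seq.length
decreasing_by
  have hlt : (List.filter (fun v => v.isSome) seq).length < seq.length :=
    List.length_filter_lt_length_iff_exists.mpr ⟨none, h, by simp⟩
  simpa using hlt

-- ===== PRECONDITION & SPEC =====
def Spec_in_clause_for_seq_py (col : String) (seq : List (Option Int)) (placeholder : String) (out : String × List Int) : Prop := out = in_clause_for_seq_py_alt col seq placeholder
instance (col : String) (seq : List (Option Int)) (placeholder : String) (out : String × List Int) : Decidable (Spec_in_clause_for_seq_py col seq placeholder out) := by unfold Spec_in_clause_for_seq_py; infer_instance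

-- ===== CLAIM (what is proved, stated in full; the proofs are below) =====
def Claim_equal_in_clause_for_seq_py : Prop := ∀ (col : String) (seq : List (Option Int)) (placeholder : String), Dom_in_clause_for_seq_py col seq placeholder → Spec_in_clause_for_seq_py col seq placeholder (in_clause_for_seq_py col seq placeholder)

-- ===== LEMMAS AND PROOFS =====

lemma pv_intercalate_cons (d a : List Char) (xs : List (List Char)) (hxs : xs ≠ []) :
    List.intercalate d (a :: xs) = a ++ d ++ List.intercalate d xs := by
  cases xs with
  | nil => exact absurd rfl hxs
  | cons b t => simp [List.intercalate, List.intersperse]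

lemma pv_flatten_rep (p d : List Char) (n : Nat) (hn : n ≠ 0) :
    (List.replicate n (p ++ d)).flatten = List.intercalate d (List.replicate n p) ++ d := by
  induction n with
  | zero => exact absurd rfl hn
  | succ m ih =>
    cases m with
    | zero => simp [List.intercalate]
    | succ k =>
      rw [List.replicate_succ, List.flatten_cons, ih (Nat.succ_ne_zero k),
          List.replicate_succ (n := k + 1),
          pv_intercalate_cons _ _ _ (by simp)]
      simp [List.append_assoc]

-- B's repetition-and-slice equals A's join, for at least one placeholder
lemma pv_repeat_slice (p : List Char) (n : Nat) (hn : n ≠ 0) :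
    PySem.List.slice (PySem.List.pyRepeat (p ++ [',', ' ']) (n : Int)) none (some (-2))
      = PySem.Chars.join [',', ' '] (List.replicate n p) := by
  have h1 : PySem.List.pyRepeat (p ++ [',', ' ']) (n : Int)
      = List.intercalate [',', ' '] (List.replicate n p) ++ [',', ' '] := by
    simp [PySem.List.pyRepeat]; exact pv_flatten_rep p [',', ' '] n hn
  rw [h1, PySem.List.slice_to_neg_ofNat _ 2 (by omega)]
  have h2 : (List.intercalate [',', ' '] (List.replicate n p) ++ [',', ' ']).length
      = (List.intercalate [',', ' '] (List.replicate n p)).length + 2 := by simp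
  rw [h2, Nat.add_sub_cancel, List.take_left]
  simp [PySem.Chars.join]

lemma pv_no_null_any (l : List (Option Int)) (h : none ∉ l) :
    l.any Option.isNone = false := by
  simp only [List.any_eq_false]
  intro a ha
  simp only [Option.isNone_iff_eq_none]
  rintro rfl; exact h ha

lemma pv_null_any (l : List (Option Int)) (h : none ∈ l) :
    l.any Option.isNone = true := by
  simp only [List.any_eq_true]
  exact ⟨none, h, rfl⟩

lemma pv_no_null_filterMap_len (l : List (Option Int)) (h : none ∉ l) :
    (l.filterMap id).length = l.length := by
  induction l with
  | nil => simp
  | cons a t ih =>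
    cases a with
    | none => exact absurd (List.mem_cons_self) h
    | some x =>
      have hih := ih (fun hm => h (List.mem_cons_of_mem _ hm))
      rw [List.filterMap_cons_some (by rfl), List.length_cons, List.length_cons, hih]

lemma pv_filterMap_filter (l : List (Option Int)) :
    (l.filter (fun v => v.isSome)).filterMap id = l.filterMap id := by
  induction l with
  | nil => simp
  | cons a t ih =>
    cases a with
    | none => simpa using ih
    | some x => simpa using ih

lemma pv_not_mem_filter (l : List (Option Int)) : none ∉ l.filter (fun v => v.isSome) := by
  simp [List.mem_filter]

lemma pv_str_join (n : Nat) (p : String) :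
    PySem.Str.join ", " (List.replicate n p)
      = String.ofList (PySem.Chars.join [',', ' '] (List.replicate n p.toList)) := by
  simp [PySem.Str.join]

-- A = B on NULL-free lists (B's base case)
lemma pv_eq_no_null (col : String) (l : List (Option Int)) (placeholder : String)
    (h : none ∉ l) :
    in_clause_for_seq_py col l placeholder = in_clause_for_seq_py_alt col l placeholder := by
  rw [in_clause_for_seq_py_alt]
  unfold in_clause_for_seq_py
  simp only [pv_no_null_any l h, dif_neg h]
  by_cases hl : l = []
  · subst hl; simp
  · have hnn : l.filterMap id ≠ [] := by
      intro hc
      have := pv_no_null_filterMap_len l h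
      rw [hc] at this
      exact hl (List.eq_nil_of_length_eq_zero this.symm)
    simp only [if_neg hl, hnn, if_false]
    rw [pv_str_join, pv_no_null_filterMap_len l h,
        pv_repeat_slice placeholder.toList l.length (by simpa using hl)]
    simp

-- ===== VERDICT (by name: the statement is the Claim_ definition above) =====
theorem in_clause_for_seq_py_spec : Claim_equal_in_clause_for_seq_py := by
  intro col seq placeholder _
  unfold Spec_in_clause_for_seq_py
  by_cases h : none ∈ seq
  · rw [in_clause_for_seq_py_alt]
    simp only [dif_pos h]
    rw [← pv_eq_no_null col _ placeholder (pv_not_mem_filter seq)]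
    unfold in_clause_for_seq_py
    simp only [pv_null_any seq h, pv_no_null_any _ (pv_not_mem_filter seq),
      pv_filterMap_filter seq]
    by_cases hnn : seq.filterMap id = []
    · have hf : seq.filter (fun v => v.isSome) = [] := by
        have hlen := pv_no_null_filterMap_len _ (pv_not_mem_filter seq)
        rw [pv_filterMap_filter seq, hnn] at hlen
        exact List.eq_nil_of_length_eq_zero hlen.symm
      have hall : ∀ a ∈ seq, a = none := by simpa using hnn
      split_ifs <;> simp_all
    · have hf : seq.filter (fun v => v.isSome) ≠ [] := by
        intro hc
        exact hnn (by rw [← pv_filterMap_filter seq, hc, List.filterMap_nil])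
      have hnall : ¬ ∀ a ∈ seq, a = none := by
        intro hall; exact hnn (by simpa using hall)
      split_ifs <;> simp_all
      obtain ⟨x, hx, hne⟩ := hnall
      exact absurd (‹∀ a ∈ seq, a = none› x hx) hne
  · exact pv_eq_no_null col seq placeholder h
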